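-- pv_equiv track=rewrite | github.com/ambionics/scalpel | scalpel/src/main/resources/python3-10/pyscalpel/http/mime.py | parse_mime_header_params
-- ===== SOURCE A (Python) =====
-- def parse_mime_header_params(header_params: str) -> list[tuple[str, str]]:
--     """Takes the mime parameters as a string: 'key1="val1";key2="val2";...'
--     Parses the value and outputs a list of key/value pairs [("key1", "val1"), ("key2", "val2"), ...]
--
--     Args:
--         header_params (str): The header parameters as a string 'key1="val1";key2="val2";...'
--
--     Returns:
--         list[tuple[str, str]]: List of key/value pairs [("key1", "val1"), ("key2", "val2"), ...]
--     """
--     params = list()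
--     if header_params is not None:
--         inside_quotes = False
--         start = 0
--         for i, char in enumerate(header_params):
--             if char == '"':
--                 inside_quotes = not inside_quotes
--             elif char == ";" and not inside_quotes:
--                 pair = header_params[start:i]
--                 split_pair = pair.split("=", 1)
--                 if len(split_pair) == 2:  # Check if there is a key-value pair
--                     key, value = split_pair[0].strip(), split_pair[1].strip()
--                     value = value.strip('"')
--                     params.append((key, value))
--                 start = i + 1
--         pair = header_params[start:]
--         split_pair = pair.split("=", 1)
--         if len(split_pair) == 2:  # Check if there is a key-value pair
--             key, value = split_pair[0].strip(), split_pair[1].strip()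
--             value = value.strip('"')
--             params.append((key, value))
--     return params
-- ===== SOURCE B (Python) =====
-- def parse_mime_header_params(header_params: str) -> list[tuple[str, str]]:
--     """Segment-then-parse: collect raw segments between unquoted semicolons,
--     then handle every segment uniformly."""
--     if header_params is None:
--         return []
--     segments = []
--     current = []
--     inside_quotes = False
--     for char in header_params:
--         if char == ";" and not inside_quotes:
--             segments.append("".join(current))
--             current = []
--         else:
--             if char == '"':
--                 inside_quotes = not inside_quotes
--             current.append(char)
--     segments.append("".join(current))
--     params = []
--     for segment in segments:
--         split_pair = segment.split("=", 1)
--         if len(split_pair) == 2: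
--             params.append((split_pair[0].strip(), split_pair[1].strip().strip('"')))
--     return params
-- ===== Notes on version B (the rewrite author's own statement) =====
-- stated objective: simpler
-- what changed: B works in two uniform passes: first collect the raw segments between unquoted semicolons, then parse every segment the same way, removing A's index/slice bookkeeping and its duplicated post-loop tail block.
import Mathlib
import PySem

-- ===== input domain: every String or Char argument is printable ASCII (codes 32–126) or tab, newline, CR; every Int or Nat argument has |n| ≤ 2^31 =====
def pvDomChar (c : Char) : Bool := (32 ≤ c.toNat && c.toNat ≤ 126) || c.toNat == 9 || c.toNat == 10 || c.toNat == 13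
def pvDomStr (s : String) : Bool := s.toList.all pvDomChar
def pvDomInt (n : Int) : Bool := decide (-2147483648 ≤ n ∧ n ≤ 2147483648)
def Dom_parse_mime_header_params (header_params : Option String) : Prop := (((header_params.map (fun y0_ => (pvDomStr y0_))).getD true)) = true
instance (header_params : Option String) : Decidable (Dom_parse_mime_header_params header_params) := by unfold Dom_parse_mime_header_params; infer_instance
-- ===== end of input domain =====

-- B replaces A's index/slice bookkeeping and duplicated tail block by two uniform passes: segment, then parse each segment (objective: simpler).

-- snippet both Pythons contain: split a raw segment on the first '=' and, if it has two parts, append the stripped pair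
def pvAddPair (params : List (String × String)) (pair : List Char) : List (String × String) :=
  match PySem.Chars.splitOnMax pair ['='] 1 with
  | [key, value] =>
      params ++ [(String.ofList (PySem.Chars.strip key),
                  String.ofList (PySem.Chars.stripChars (PySem.Chars.strip value) ['"']))]
  | _ => params

-- ===== PORT A =====
def pvStepA (cs : List Char) (st : Bool × Int × List (String × String)) (ic : Int × Char) :
    Bool × Int × List (String × String) :=
  if ic.2 == '"' then (!st.1, st.2.1, st.2.2)
  else if ic.2 == ';' && !st.1 then
    (st.1, ic.1 + 1, pvAddPair st.2.2 (PySem.List.slice cs (some st.2.1) (some ic.1)))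
  else st

def parse_mime_header_params (header_params : Option String) : List (String × String) :=
  match header_params with
  | none => []
  | some s =>
    let cs := s.toList
    let st := (PySem.List.enumerate cs).foldl (pvStepA cs) (false, 0, [])
    pvAddPair st.2.2 (PySem.List.slice cs (some st.2.1) none)

-- ===== PORT B =====
def pvStepB (st : List (List Char) × List Char × Bool) (char : Char) :
    List (List Char) × List Char × Bool :=
  if char == ';' && !st.2.2 then (st.1 ++ [st.2.1], [], st.2.2)
  else (st.1, st.2.1 ++ [char], if char == '"' then !st.2.2 else st.2.2)

def parse_mime_header_params_alt (header_params : Option String) : List (String × String) :=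
  match header_params with
  | none => []
  | some s =>
    let st := s.toList.foldl pvStepB ([], [], false)
    (st.1 ++ [st.2.1]).foldl pvAddPair []

-- ===== PRECONDITION & SPEC =====
def Spec_parse_mime_header_params (header_params : Option String) (out : List (String × String)) : Prop := out = parse_mime_header_params_alt header_params
instance (header_params : Option String) (out : List (String × String)) : Decidable (Spec_parse_mime_header_params header_params out) := by unfold Spec_parse_mime_header_params; infer_instance

-- ===== CLAIM (what is proved, stated in full; the proofs are below) =====
def Claim_equal_parse_mime_header_params : Prop := ∀ (header_params : Option String), Dom_parse_mime_header_params header_params → Spec_parse_mime_header_params header_params (parse_mime_header_params header_params)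

-- ===== LEMMAS AND PROOFS =====

-- the pairs produced by one raw segment (empty if the segment has no '=')
def pvG (seg : List Char) : List (String × String) := pvAddPair [] seg

-- specification of the segment list: segments of the remaining input, given the quote state
def pvSegs (q : Bool) : List Char → List (List Char)
  | [] => [[]]
  | c :: rest =>
      if c == ';' && !q then [] :: pvSegs q rest
      else ((pvSegs (if c == '"' then !q else q) rest).modifyHead (c :: ·))

theorem pvAddPair_eq (params : List (String × String)) (seg : List Char) :
    pvAddPair params seg = params ++ pvG seg := by
  unfold pvG pvAddPair
  rcases PySem.Chars.splitOnMax seg ['='] 1 with _ | ⟨k, _ | ⟨v, _ | _⟩⟩ <;> simp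

theorem pvModifyHead_comp {α : Type} (f g : List α → List α) (l : List (List α)) :
    (l.modifyHead g).modifyHead f = l.modifyHead (fun x => f (g x)) := by
  cases l <;> simp

theorem pvModifyHead_id {α : Type} (l : List (List α)) :
    l.modifyHead (fun x => x) = l := by
  cases l <;> simp

theorem pvTake_succ (cs : List Char) (k start : Nat) (c : Char) (rest : List Char)
    (h : cs.drop k = c :: rest) (hs : start ≤ k) :
    (cs.drop start).take (k + 1 - start) = (cs.drop start).take (k - start) ++ [c] := by
  have h2 : (cs.drop start).drop (k - start) = c :: rest := by
    rw [List.drop_drop, Nat.add_sub_cancel' hs, h]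
  rw [show k + 1 - start = (k - start) + 1 from by omega, List.take_add, h2]
  simp

theorem pvDrop_succ (cs : List Char) (k : Nat) (c : Char) (rest : List Char)
    (h : cs.drop k = c :: rest) : cs.drop (k + 1) = rest := by
  have h2 : List.drop 1 (List.drop k cs) = List.drop 1 (c :: rest) := by rw [h]
  rw [List.drop_drop] at h2
  simpa [Nat.add_comm] using h2

theorem pvA_loop (rest : List Char) : ∀ (cs : List Char) (k start : Nat) (q : Bool)
    (params : List (String × String)),
    cs.drop k = rest → start ≤ k →
    pvAddPair ((PySem.List.enumerate rest (k : Int)).foldl (pvStepA cs) (q, (start : Int), params)).2.2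
      (PySem.List.slice cs (some ((PySem.List.enumerate rest (k : Int)).foldl (pvStepA cs) (q, (start : Int), params)).2.1) none)
    = params ++ (((pvSegs q rest).modifyHead ((cs.drop start).take (k - start) ++ ·)).flatMap pvG) := by
  induction rest with
  | nil =>
    intro cs k start q params hk hs
    have hlen : cs.length ≤ k := List.drop_eq_nil_iff.mp hk
    have htake : (cs.drop start).take (k - start) = cs.drop start := by
      apply List.take_of_length_le; simp; omega
    rw [PySem.List.enumerate_nil, List.foldl_nil, pvAddPair_eq]
    have hslice : PySem.List.slice cs (some ((start : Nat) : Int)) none = cs.drop start :=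
      PySem.List.slice_from_natCast cs start
    rw [hslice]
    simp [pvSegs, htake]
  | cons c rest ih =>
    intro cs k start q params hk hs
    have hdrop : cs.drop (k + 1) = rest := pvDrop_succ cs k c rest hk
    rw [PySem.List.enumerate_cons, List.foldl_cons,
      show (k : Int) + 1 = ((k + 1 : Nat) : Int) from by push_cast; ring]
    by_cases h1 : c = '"'
    · subst h1
      have hstep : pvStepA cs (q, (start : Int), params) (((k : Nat) : Int), '"')
          = (!q, (start : Int), params) := by simp [pvStepA]
      rw [hstep, ih cs (k + 1) start (!q) params hdrop (by omega)]
      have hsegs : pvSegs q ('"' :: rest) = (pvSegs (!q) rest).modifyHead ('"' :: ·) := by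
        simp [pvSegs]
      rw [hsegs, pvModifyHead_comp]
      have hfun : (fun x => (cs.drop start).take (k - start) ++ ('"' :: x))
          = (fun x => (cs.drop start).take (k + 1 - start) ++ x) := by
        funext x
        rw [pvTake_succ cs k start '"' rest hk hs]
        simp
      rw [hfun]
    · by_cases h2 : c = ';' ∧ q = false
      · obtain ⟨hc, hq⟩ := h2
        subst hc; subst hq
        have hstep : pvStepA cs (false, (start : Int), params) (((k : Nat) : Int), ';')
            = (false, ((k : Nat) : Int) + 1,
               pvAddPair params (PySem.List.slice cs (some ((start : Nat) : Int)) (some ((k : Nat) : Int)))) := by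
          simp [pvStepA]
        have hslice : PySem.List.slice cs (some ((start : Nat) : Int)) (some ((k : Nat) : Int))
            = (cs.drop start).take (k - start) := PySem.List.slice_natCast cs start k
        rw [hstep, hslice,
          show ((k : Nat) : Int) + 1 = (((k + 1 : Nat)) : Int) from by push_cast; ring,
          ih cs (k + 1) (k + 1) false (pvAddPair params ((cs.drop start).take (k - start))) hdrop (le_refl _)]
        have hsegs : pvSegs false (';' :: rest) = [] :: pvSegs false rest := by
          simp [pvSegs]
        rw [hsegs]
        simp only [Nat.sub_self, List.take_zero, List.nil_append, pvModifyHead_id,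
          List.modifyHead_cons, List.flatMap_cons, pvAddPair_eq]
        simp [pvG]
      · have hcond : (c == ';' && !q) = false := by
          have hcc : q = true ∨ (c == ';') = false := by
            rcases Bool.eq_false_or_eq_true q with hq | hq
            · exact Or.inl hq
            · subst hq
              exact Or.inr (by rw [beq_eq_false_iff_ne]; exact fun hcc => h2 ⟨hcc, rfl⟩)
          rcases hcc with hq | hcc
          · simp [hq]
          · simp [hcc]
        have hne : (c == '"') = false := by simp [h1]
        have hstep : pvStepA cs (q, (start : Int), params) (((k : Nat) : Int), c)
            = (q, (start : Int), params) := by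
          simp [pvStepA, hne, hcond]
        rw [hstep, ih cs (k + 1) start q params hdrop (by omega)]
        have hsegs : pvSegs q (c :: rest) = (pvSegs q rest).modifyHead (c :: ·) := by
          simp [pvSegs, hcond, hne]
        rw [hsegs, pvModifyHead_comp]
        have hfun : (fun x => (cs.drop start).take (k - start) ++ (c :: x))
            = (fun x => (cs.drop start).take (k + 1 - start) ++ x) := by
          funext x
          rw [pvTake_succ cs k start c rest hk hs]
          simp
        rw [hfun]

theorem pvB_loop (rest : List Char) : ∀ (segs : List (List Char)) (cur : List Char) (q : Bool),
    (rest.foldl pvStepB (segs, cur, q)).1 ++ [(rest.foldl pvStepB (segs, cur, q)).2.1]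
    = segs ++ (pvSegs q rest).modifyHead (cur ++ ·) := by
  induction rest with
  | nil => intro segs cur q; simp [pvSegs]
  | cons c rest ih =>
    intro segs cur q
    by_cases h : (c == ';' && !q) = true
    · rw [List.foldl_cons, show pvStepB (segs, cur, q) c = (segs ++ [cur], [], q) from by
        unfold pvStepB; rw [if_pos h], ih]
      have hsegs : pvSegs q (c :: rest) = [] :: pvSegs q rest := by
        simp [pvSegs, h]
      rw [hsegs]
      simp [pvModifyHead_id]
    · rw [List.foldl_cons, show pvStepB (segs, cur, q) c
          = (segs, cur ++ [c], if c == '"' then !q else q) from by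
        unfold pvStepB; rw [if_neg h], ih]
      have hsegs : pvSegs q (c :: rest)
          = (pvSegs (if c == '"' then !q else q) rest).modifyHead (c :: ·) := by
        rw [pvSegs, if_neg h]
      rw [hsegs, pvModifyHead_comp]
      have hfun : (fun x => cur ++ (c :: x)) = (fun x => cur ++ [c] ++ x) := by
        funext x; simp
      rw [hfun]

theorem pvFoldAdd (segs : List (List Char)) : ∀ (params : List (String × String)),
    segs.foldl pvAddPair params = params ++ segs.flatMap pvG := by
  induction segs with
  | nil => intro params; simp
  | cons s t ih => intro params; rw [List.foldl_cons, pvAddPair_eq, ih]; simp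

-- ===== VERDICT (by name: the statement is the Claim_ definition above) =====
theorem parse_mime_header_params_spec : Claim_equal_parse_mime_header_params := by
  intro header_params _
  unfold Spec_parse_mime_header_params
  match header_params with
  | none => rfl
  | some s =>
    show parse_mime_header_params (some s) = parse_mime_header_params_alt (some s)
    have hA := pvA_loop s.toList s.toList 0 0 false [] (by simp) (le_refl 0)
    have hB := pvB_loop s.toList [] [] false
    simp only [Nat.sub_zero, List.take_zero, List.drop_zero, Nat.cast_zero,
      List.nil_append, pvModifyHead_id] at hA hB
    simp only [parse_mime_header_params, parse_mime_header_params_alt]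
    rw [hB, pvFoldAdd, List.nil_append, ← hA]
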